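-- pv_equiv track=rewrite | github.com/christopherhojny/supplement_simple-iterative-methods-linopt-convex-sets | auxiliary.py | compute_degree_conss
-- ===== SOURCE A (Python) =====
-- def compute_degree_conss(nodes, edge_list):
--     '''
--     generates list of left-hand sides of degree constraints for a given graph
--     nodes     - nodes in graph
--     egde_list - list of edges in graph
--     '''
--     conss = []
--     for v in nodes:
--         cons = []
--         for e in range(len(edge_list)):
--             if v in edge_list[e]:
--                 cons.append(1)
--             else:
--                 cons.append(0)
--         conss.append(cons)
--
--     return conss
-- ===== SOURCE B (Python) =====
-- def compute_degree_conss(nodes, edge_list):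
--     '''
--     generates list of left-hand sides of degree constraints for a given graph
--     nodes     - nodes in graph
--     egde_list - list of edges in graph
--     '''
--     # one pass over the edges builds an incidence index: node -> edge indices
--     incident = {}
--     for e, (u, w) in enumerate(edge_list):
--         incident.setdefault(u, []).append(e)
--         incident.setdefault(w, []).append(e)
--     m = len(edge_list)
--     conss = []
--     for v in nodes:
--         row = [0] * m
--         for e in incident.get(v, []):
--             row[e] = 1
--         conss.append(row)
--     return conss
-- ===== Notes on version B (the rewrite author's own statement) =====
-- stated objective: faster
-- what changed: Replaces the per-(node,edge) membership scan with a single pass that builds an incidence index (node -> list of edge indices) and then fills each node's 0-row at the indexed positions.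
import Mathlib
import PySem

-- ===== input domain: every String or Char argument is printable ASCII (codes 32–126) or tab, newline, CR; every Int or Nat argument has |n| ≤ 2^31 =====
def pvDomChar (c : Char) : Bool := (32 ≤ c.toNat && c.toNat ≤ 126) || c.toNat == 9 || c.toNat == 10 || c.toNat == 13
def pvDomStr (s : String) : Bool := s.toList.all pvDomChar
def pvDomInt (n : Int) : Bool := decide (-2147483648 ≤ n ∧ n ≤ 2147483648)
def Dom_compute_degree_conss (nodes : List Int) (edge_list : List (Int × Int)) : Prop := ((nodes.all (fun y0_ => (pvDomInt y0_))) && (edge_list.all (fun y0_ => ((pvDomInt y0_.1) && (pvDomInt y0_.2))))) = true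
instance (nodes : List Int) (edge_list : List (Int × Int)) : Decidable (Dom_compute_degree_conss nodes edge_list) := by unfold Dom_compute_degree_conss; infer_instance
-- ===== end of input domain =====

-- B replaces the per-(node,edge) membership scan by an incidence index (node -> edge indices) built
-- in one pass, then fills each node's zero row at the indexed positions (objective: faster by constant factor).

-- ===== PORT A =====
-- for v in nodes: for e in range(len(edge_list)): cons.append(1 if v in edge_list[e] else 0)
def compute_degree_conss (nodes : List Int) (edge_list : List (Int × Int)) : List (List Int) :=
  nodes.foldl (fun conss v =>
    conss ++ [(PySem.List.pyRange 0 (edge_list.length : Int) 1).foldl (fun cons e =>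
      cons ++ [if v = (PySem.List.pyGetD edge_list e (0, 0)).1 ∨ v = (PySem.List.pyGetD edge_list e (0, 0)).2
               then (1 : Int) else 0]) []]) []

-- ===== PORT B =====
-- incident.setdefault(u, []).append(e)  ==  incident[u] = incident.get(u, []) + [e]
def pvAddInc (d : PySem.Dict Int (List Nat)) (u : Int) (e : Nat) : PySem.Dict Int (List Nat) :=
  d.insert u (d.getD u [] ++ [e])

-- for e, (u, w) in enumerate(edge_list): add both endpoints
def pvBuildInc : List (Int × Int) → Nat → PySem.Dict Int (List Nat) → PySem.Dict Int (List Nat)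
  | [], _, d => d
  | (u, w) :: rest, e, d => pvBuildInc rest (e + 1) (pvAddInc (pvAddInc d u e) w e)

-- row = [0]*m; for e in idxs: row[e] = 1   (every index produced by pvBuildInc is < m, so List.set never clips)
def pvFillRow (m : Nat) (idxs : List Nat) : List Int :=
  idxs.foldl (fun r e => r.set e 1) (List.replicate m 0)

def compute_degree_conss_alt (nodes : List Int) (edge_list : List (Int × Int)) : List (List Int) :=
  let inc := pvBuildInc edge_list 0 PySem.Dict.empty
  nodes.map (fun v => pvFillRow edge_list.length (inc.getD v []))

-- ===== PRECONDITION & SPEC =====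
def Spec_compute_degree_conss (nodes : List Int) (edge_list : List (Int × Int)) (out : List (List Int)) : Prop := out = compute_degree_conss_alt nodes edge_list
instance (nodes : List Int) (edge_list : List (Int × Int)) (out : List (List Int)) : Decidable (Spec_compute_degree_conss nodes edge_list out) := by unfold Spec_compute_degree_conss; infer_instance

-- ===== CLAIM (what is proved, stated in full; the proofs are below) =====
def Claim_equal_compute_degree_conss : Prop := ∀ (nodes : List Int) (edge_list : List (Int × Int)), Dom_compute_degree_conss nodes edge_list → Spec_compute_degree_conss nodes edge_list (compute_degree_conss nodes edge_list)

-- ===== LEMMAS AND PROOFS =====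

lemma mem_addInc (d : PySem.Dict Int (List Nat)) (u : Int) (e : Nat) (v : Int) (x : Nat) :
    x ∈ (pvAddInc d u e).getD v [] ↔ x ∈ d.getD v [] ∨ (v = u ∧ x = e) := by
  simp only [pvAddInc, PySem.Dict.getD_insert]
  split_ifs with h
  · subst h; simp
  · simp [h]

lemma mem_buildInc (rest : List (Int × Int)) (k : Nat) (d : PySem.Dict Int (List Nat)) (v : Int) (x : Nat) :
    x ∈ (pvBuildInc rest k d).getD v [] ↔
      x ∈ d.getD v [] ∨ (k ≤ x ∧ x - k < rest.length ∧
        (v = (rest.getD (x - k) (0, 0)).1 ∨ v = (rest.getD (x - k) (0, 0)).2)) := by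
  induction rest generalizing k d with
  | nil => simp [pvBuildInc]
  | cons p t ih =>
    obtain ⟨u, w⟩ := p
    rw [pvBuildInc, ih, mem_addInc, mem_addInc]
    constructor
    · rintro (((h | ⟨hv, hx⟩) | ⟨hv, hx⟩) | ⟨h1, h2, h3⟩)
      · exact Or.inl h
      · subst hx; exact Or.inr ⟨le_refl _, by simp, by simp [hv]⟩
      · subst hx; exact Or.inr ⟨le_refl _, by simp, by simp [hv]⟩
      · refine Or.inr ⟨by omega, by simp; omega, ?_⟩
        have hx : x - k = (x - (k + 1)) + 1 := by omega
        simpa [hx] using h3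
    · rintro (h | ⟨h1, h2, h3⟩)
      · exact Or.inl (Or.inl (Or.inl h))
      · by_cases hk : x = k
        · subst hk
          simp at h3
          rcases h3 with h3 | h3
          · exact Or.inl (Or.inl (Or.inr ⟨h3, rfl⟩))
          · exact Or.inl (Or.inr ⟨h3, rfl⟩)
        · refine Or.inr ⟨by omega, by simp at h2 ⊢; omega, ?_⟩
          have hx : x - k = (x - (k + 1)) + 1 := by omega
          rw [hx] at h3
          simpa using h3

lemma getElem?_fill (idxs : List Nat) (acc : List Int) (i : Nat) :
    (idxs.foldl (fun r e => r.set e 1) acc)[i]? =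
      if i ∈ idxs ∧ i < acc.length then some 1 else acc[i]? := by
  induction idxs generalizing acc with
  | nil => simp
  | cons e t ih =>
    simp only [List.foldl_cons, ih, List.length_set, List.getElem?_set, List.mem_cons]
    by_cases hl : i < acc.length
    · by_cases he : i ∈ t
      · simp [he, hl]
      · by_cases hie : e = i
        · subst hie; simp [he, hl]
        · have : ¬ i = e := fun h => hie h.symm
          simp [he, hie, this, hl]
    · have hnone : acc[i]? = none := by
        rw [List.getElem?_eq_none_iff]; omega
      by_cases he : i ∈ t <;> by_cases hie : e = i <;> simp_all
      omega

lemma fillRow_eq_map (m : Nat) (idxs : List Nat) :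
    pvFillRow m idxs = (List.range m).map (fun i => if i ∈ idxs then (1 : Int) else 0) := by
  apply List.ext_getElem?
  intro i
  rw [pvFillRow, getElem?_fill]
  by_cases hi : i < m
  · by_cases hmem : i ∈ idxs <;>
      simp [hi, hmem]
  · simp [hi]

lemma row_a_eq (v : Int) (edge_list : List (Int × Int)) :
    (PySem.List.pyRange 0 (edge_list.length : Int) 1).foldl (fun cons e =>
      cons ++ [if v = (PySem.List.pyGetD edge_list e (0, 0)).1 ∨ v = (PySem.List.pyGetD edge_list e (0, 0)).2
               then (1 : Int) else 0]) [] =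
    edge_list.map (fun p => if v = p.1 ∨ v = p.2 then (1 : Int) else 0) := by
  have h1 := PySem.List.foldl_pyRange_zero_pyGetD' edge_list ((0 : Int), (0 : Int))
      (fun (cons : List Int) (p : Int × Int) => cons ++ [if v = p.1 ∨ v = p.2 then (1 : Int) else 0]) []
  simp only [PySem.List.foldl_append_singleton_eq_map, List.nil_append] at h1 ⊢
  exact h1

lemma row_b_eq (v : Int) (edge_list : List (Int × Int)) :
    pvFillRow edge_list.length ((pvBuildInc edge_list 0 PySem.Dict.empty).getD v []) =
    edge_list.map (fun p => if v = p.1 ∨ v = p.2 then (1 : Int) else 0) := by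
  rw [fillRow_eq_map]
  apply List.ext_getElem?
  intro i
  by_cases hi : i < edge_list.length
  · rw [List.getElem?_map, List.getElem?_map, List.getElem?_range hi,
        List.getElem?_eq_getElem hi]
    simp only [Option.map_some]
    congr 1
    have hmem : i ∈ (pvBuildInc edge_list 0 PySem.Dict.empty).getD v [] ↔
        (v = edge_list[i].1 ∨ v = edge_list[i].2) := by
      rw [mem_buildInc]
      simp only [PySem.Dict.getD_empty, List.not_mem_nil, false_or, Nat.zero_le, Nat.sub_zero,
        true_and, List.getD_eq_getElem?_getD, List.getElem?_eq_getElem hi]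
      simp [hi]
    simp [hmem]
  · simp [hi]

-- ===== VERDICT (by name: the statement is the Claim_ definition above) =====
theorem compute_degree_conss_spec : Claim_equal_compute_degree_conss := by
  intro nodes edge_list _
  unfold Spec_compute_degree_conss compute_degree_conss compute_degree_conss_alt
  rw [PySem.List.foldl_append_singleton_eq_map]
  simp only [List.nil_append]
  apply List.map_congr_left
  intro v _
  rw [row_a_eq, row_b_eq]
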